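-- pv_equiv track=rewrite | github.com/schenk98/skola | Diplomová práce/pointsProcessing.py | checkAround
-- ===== SOURCE A (Python) =====
-- def checkAround(grid, x, y, checkRadius, threshold, xRange, yRange, depth, sparseVisited=list(),visited=list()):
--     checkAroundDepth = [4,10,25]
--     if depth == 0:
--         sparseVisited=list()
--         visited=list()
--         sparseVisited.append(x+y*xRange)
--
--     if (x+y*xRange) not in visited and checkRadius > 0 and x in grid and y in grid[x]:
--         visited.append(x+y*xRange)
--         delta = checkRadius
--         if depth > checkAroundDepth[2]:
--             delta-=1
--         if depth > checkAroundDepth[1]: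
--             delta -=1
--         if depth > checkAroundDepth[0]:
--             delta -=1
--         for dx in range(-delta,delta+1):
--             for dy in range(-delta,delta+1):
--                 if not (dx == 0 and dy == 0):
--                     new_x = x + dx
--                     new_y = y + dy #neighbours
--                     if new_x > 0 and new_x < xRange and new_y > 0 and new_y < yRange:
--                         if len(grid[new_x][new_y]) < threshold:
--                             sparseVisited.append(new_x+new_y*xRange)
--                             visited1, sparseVisited1 = checkAround(grid, new_x, new_y, delta, threshold, xRange, yRange, depth+1,sparseVisited, visited)
--                             for v in visited1:
--                                 if v not in visited:
--                                     visited.append(v)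
--                             for s in sparseVisited1:
--                                 if s not in sparseVisited:
--                                     sparseVisited.append(s)
--                         else:
--                             if (new_x+new_y*xRange) not in visited:
--                                 visited.append(new_x+new_y*xRange)
--     return visited, sparseVisited
-- ===== SOURCE B (Python) =====
-- # Iterative explicit-stack DFS replacing A's recursion; A's merge loops are no-ops
-- # (the recursion mutates the shared lists in place), so B drops them entirely.
-- # Like A, this mutates the caller's sparseVisited/visited lists in place when depth != 0;
-- # the proved equivalence is about the returned pair.
-- def checkAround(grid, x, y, checkRadius, threshold, xRange, yRange, depth, sparseVisited=list(), visited=list()):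
--     if depth == 0:
--         sparseVisited = [x + y * xRange]
--         visited = []
--     stack = [("visit", x, y, checkRadius, depth)]
--     while stack:
--         item = stack.pop()
--         if item[0] == "dense":
--             code = item[1]
--             if code not in visited:
--                 visited.append(code)
--             continue
--         _, cx, cy, cr, d = item
--         code = cx + cy * xRange
--         if item[0] == "sparse":
--             sparseVisited.append(code)
--         if code not in visited and cr > 0 and cx in grid and cy in grid[cx]:
--             visited.append(code)
--             delta = cr - (d > 25) - (d > 10) - (d > 4)
--             children = []
--             for dx in range(-delta, delta + 1):
--                 for dy in range(-delta, delta + 1):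
--                     if dx == 0 and dy == 0:
--                         continue
--                     nx, ny = cx + dx, cy + dy
--                     if 0 < nx < xRange and 0 < ny < yRange:
--                         if len(grid[nx][ny]) < threshold:
--                             children.append(("sparse", nx, ny, delta, d + 1))
--                         else:
--                             children.append(("dense", nx + ny * xRange))
--             stack.extend(reversed(children))
--     return visited, sparseVisited
-- ===== Notes on version B (the rewrite author's own statement) =====
-- stated objective: alternative
-- what changed: Replaces A's recursive flood-fill (with its two redundant merge loops, which are no-ops because the recursion mutates the shared lists in place) by an iterative DFS over an explicit stack of visit/sparse/dense work items, classifying each cell's neighbours in one pure scan and pushing them in reverse so pops reproduce A's exact append order.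
import Mathlib
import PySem

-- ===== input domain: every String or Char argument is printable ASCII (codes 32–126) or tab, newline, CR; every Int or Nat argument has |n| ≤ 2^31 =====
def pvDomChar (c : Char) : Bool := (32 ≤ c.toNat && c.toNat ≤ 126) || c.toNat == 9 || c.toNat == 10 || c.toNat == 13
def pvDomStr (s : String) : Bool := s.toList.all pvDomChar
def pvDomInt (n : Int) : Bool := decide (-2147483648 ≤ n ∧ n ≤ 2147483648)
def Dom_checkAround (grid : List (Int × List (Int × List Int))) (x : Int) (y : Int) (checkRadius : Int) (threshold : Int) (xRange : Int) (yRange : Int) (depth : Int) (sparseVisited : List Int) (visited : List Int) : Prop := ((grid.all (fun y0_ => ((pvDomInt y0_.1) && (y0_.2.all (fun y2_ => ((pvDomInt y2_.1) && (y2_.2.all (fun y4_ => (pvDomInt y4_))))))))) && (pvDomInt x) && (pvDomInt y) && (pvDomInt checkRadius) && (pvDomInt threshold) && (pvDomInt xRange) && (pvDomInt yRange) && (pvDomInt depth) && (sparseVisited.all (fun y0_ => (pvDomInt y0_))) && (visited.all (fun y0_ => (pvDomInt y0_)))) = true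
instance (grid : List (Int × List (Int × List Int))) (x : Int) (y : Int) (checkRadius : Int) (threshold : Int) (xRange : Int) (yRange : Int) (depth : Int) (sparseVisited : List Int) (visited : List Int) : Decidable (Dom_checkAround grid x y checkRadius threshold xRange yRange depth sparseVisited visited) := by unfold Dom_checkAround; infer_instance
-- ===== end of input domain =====

-- B replaces A's recursion by an explicit-stack iterative DFS and drops A's merge loops
-- (which are no-ops because Python A mutates the shared lists in place); equivalence is
-- about the returned pair (both Pythons also append to the caller's lists when depth != 0).


-- ===== PORT A =====
-- shared lookup helpers ('x in grid', 'y in grid[x]', 'grid[nx][ny]'); exact where the keys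
-- exist (Pre_ excludes the KeyError cases, where getD [] stands in for Python's raise)
def caInGrid (grid : List (Int × List (Int × List Int))) (x y : Int) : Bool :=
  match (PySem.Dict.mk grid).get? x with
  | none => false
  | some row => ((PySem.Dict.mk row).get? y).isSome

def caCell (grid : List (Int × List (Int × List Int))) (nx ny : Int) : List Int :=
  ((PySem.Dict.mk (((PySem.Dict.mk grid).get? nx).getD [])).get? ny).getD []

-- one step of A's 'if v not in visited: visited.append(v)' merge loops
def caMergeStep (a : List Int) (e : Int) : List Int := if e ∈ a then a else a ++ [e]

-- literal port of A's recursion; fuel is only a totality device (the wrapper below passes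
-- enough for every depth ≥ 0 input). Python's aliased 'visited1 IS visited' is modelled by
-- folding the merge loops over the returned lists themselves.
def checkAroundFuel (grid : List (Int × List (Int × List Int))) (x y checkRadius threshold xRange yRange depth : Int) (sparseVisited visited : List Int) : Nat → List Int × List Int
  | 0 => (visited, sparseVisited)
  | Nat.succ fuel =>
    let code := x + y * xRange
    let sv0 := if depth = 0 then [code] else sparseVisited
    let v0 := if depth = 0 then ([] : List Int) else visited
    if code ∉ v0 ∧ 0 < checkRadius ∧ caInGrid grid x y = true then
      let v1 := v0 ++ [code]
      let d1 := checkRadius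
      let d2 := if 25 < depth then d1 - 1 else d1
      let d3 := if 10 < depth then d2 - 1 else d2
      let delta := if 4 < depth then d3 - 1 else d3
      (PySem.List.pyRange (-delta) (delta + 1) 1).foldl (fun st dx =>
        (PySem.List.pyRange (-delta) (delta + 1) 1).foldl (fun st dy =>
          if ¬(dx = 0 ∧ dy = 0) then
            let nx := x + dx
            let ny := y + dy
            if 0 < nx ∧ nx < xRange ∧ 0 < ny ∧ ny < yRange then
              if ((caCell grid nx ny).length : Int) < threshold then
                let sv1 := st.2 ++ [nx + ny * xRange]
                let p := checkAroundFuel grid nx ny delta threshold xRange yRange (depth + 1) sv1 st.1 fuel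
                (p.1.foldl caMergeStep p.1, p.2.foldl caMergeStep p.2)
              else
                if nx + ny * xRange ∉ st.1 then (st.1 ++ [nx + ny * xRange], st.2) else st
            else st
          else st) st) (v1, sv0)
    else (v0, sv0)

def checkAround (grid : List (Int × List (Int × List Int))) (x : Int) (y : Int) (checkRadius : Int) (threshold : Int) (xRange : Int) (yRange : Int) (depth : Int) (sparseVisited : List Int) (visited : List Int) : List Int × List Int :=
  checkAroundFuel grid x y checkRadius threshold xRange yRange depth sparseVisited visited
    (6 * checkRadius.toNat + (5 - depth).toNat + 1)

-- ===== PORT B =====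
inductive CAItem where
  | visit (x y cr d : Int)
  | sparse (x y cr d : Int)
  | dense (code : Int)
deriving DecidableEq, Repr

-- neighbour classification (the body of B's children-collecting loop)
def caClassify (grid : List (Int × List (Int × List Int))) (threshold xRange yRange cx cy delta d : Int) (dx dy : Int) : Option CAItem :=
  if dx = 0 ∧ dy = 0 then none
  else
    let nx := cx + dx
    let ny := cy + dy
    if 0 < nx ∧ nx < xRange ∧ 0 < ny ∧ ny < yRange then
      if ((caCell grid nx ny).length : Int) < threshold then
        some (CAItem.sparse nx ny delta (d + 1))
      else some (CAItem.dense (nx + ny * xRange))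
    else none

def caChildren (grid : List (Int × List (Int × List Int))) (threshold xRange yRange cx cy delta d : Int) : List CAItem :=
  (PySem.List.pyRange (-delta) (delta + 1) 1).flatMap fun dx =>
    (PySem.List.pyRange (-delta) (delta + 1) 1).filterMap fun dy =>
      caClassify grid threshold xRange yRange cx cy delta d dx dy

-- guard-and-push step shared by 'visit' and 'sparse' stack items
def caVisit (grid : List (Int × List (Int × List Int))) (threshold xRange yRange cx cy cr d : Int) (rest : List CAItem) (v : List Int) : List CAItem × List Int :=
  let code := cx + cy * xRange
  if code ∉ v ∧ 0 < cr ∧ caInGrid grid cx cy = true then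
    let delta := cr - (if 25 < d then 1 else 0) - (if 10 < d then 1 else 0) - (if 4 < d then 1 else 0)
    (caChildren grid threshold xRange yRange cx cy delta d ++ rest, v ++ [code])
  else (rest, v)

-- all cell codes the grid can ever contribute to 'visited' via the guard (termination measure only)
def caCodes (grid : List (Int × List (Int × List Int))) (xRange : Int) : List Int :=
  grid.flatMap fun p => p.2.map fun q => p.1 + q.1 * xRange

lemma caFilter_le (l v : List Int) (a : Int) :
    (l.filter fun c => decide (c ∉ v ++ [a])).length ≤ (l.filter fun c => decide (c ∉ v)).length :=
  List.Sublist.length_le (List.monotone_filter_right l (by intro c hc; simp at hc ⊢; exact hc.1))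

lemma caFilter_lt (l v : List Int) (a : Int) (ha : a ∈ l) (hv : a ∉ v) :
    (l.filter fun c => decide (c ∉ v ++ [a])).length < (l.filter fun c => decide (c ∉ v)).length := by
  induction l with
  | nil => simp at ha
  | cons b t ih =>
    rcases List.mem_cons.mp ha with rfl | hbt
    · simp only [List.filter_cons]
      have h1 : (decide (a ∉ v ++ [a])) = false := by simp
      have h2 : (decide (a ∉ v)) = true := by simpa using hv
      rw [h1, h2]
      exact Nat.lt_succ_of_le (caFilter_le t v a)
    · simp only [List.filter_cons]
      by_cases hb : b ∉ v ++ [a]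
      · have : b ∉ v := fun h => hb (by simp [h])
        simp only [hb, this]
        simpa using Nat.succ_lt_succ (ih hbt)
      · simp only [hb, decide_false]
        by_cases hbv : b ∉ v
        · simp only [hbv]
          exact Nat.lt_succ_of_lt (ih hbt)
        · simp only [hbv, decide_false]
          exact ih hbt

lemma mem_caCodes_of_inGrid (grid : List (Int × List (Int × List Int))) (xRange x y : Int)
    (h : caInGrid grid x y = true) : x + y * xRange ∈ caCodes grid xRange := by
  unfold caInGrid at h
  rcases hrow : (PySem.Dict.mk grid).get? x with _ | row
  · rw [hrow] at h; simp at h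
  · rw [hrow] at h
    simp only [Option.isSome_iff_exists] at h
    rcases h with ⟨cell, hcell⟩
    have h1 : (x, row) ∈ grid := PySem.Dict.mem_items_of_get?_eq_some _ hrow
    have h2 : (y, cell) ∈ row := PySem.Dict.mem_items_of_get?_eq_some _ hcell
    simp only [caCodes, List.mem_flatMap]
    exact ⟨(x, row), h1, List.mem_map.mpr ⟨(y, cell), h2, rfl⟩⟩

-- caVisit either leaves (stack-tail, visited) unchanged or strictly shrinks the unvisited codes
lemma caVisit_spec (grid : List (Int × List (Int × List Int))) (threshold xRange yRange cx cy cr d : Int) (rest : List CAItem) (v : List Int) :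
    ((caVisit grid threshold xRange yRange cx cy cr d rest v).1 = rest ∧
     (caVisit grid threshold xRange yRange cx cy cr d rest v).2 = v) ∨
    ((caCodes grid xRange).filter fun c => decide (c ∉ (caVisit grid threshold xRange yRange cx cy cr d rest v).2)).length
      < ((caCodes grid xRange).filter fun c => decide (c ∉ v)).length := by
  simp only [caVisit]
  by_cases hg : (cx + cy * xRange) ∉ v ∧ 0 < cr ∧ caInGrid grid cx cy = true
  · rw [if_pos hg]
    right
    exact caFilter_lt _ _ _ (mem_caCodes_of_inGrid grid xRange cx cy hg.2.2) hg.1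
  · rw [if_neg hg]
    left; exact ⟨rfl, rfl⟩

lemma caLex_helper {a' a b' b : Nat} (h1 : a' ≤ a) (h2 : b' < b) :
    Prod.Lex (· < ·) (· < ·) (a', b') (a, b) := by
  rcases Nat.lt_or_ge a' a with h | h
  · exact Prod.Lex.left _ _ h
  · have : a' = a := Nat.le_antisymm h1 h
    subst this
    exact Prod.Lex.right _ h2

-- B's while loop over the explicit stack (list head = top of stack; pushing the children
-- list reversed in Python = prepending it here, so pops come in A's neighbour order)
def runB (grid : List (Int × List (Int × List Int))) (threshold xRange yRange : Int) : List CAItem → List Int → List Int → List Int × List Int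
  | [], v, sv => (v, sv)
  | CAItem.dense code :: rest, v, sv =>
      if code ∉ v then runB grid threshold xRange yRange rest (v ++ [code]) sv
      else runB grid threshold xRange yRange rest v sv
  | CAItem.visit x y cr d :: rest, v, sv =>
      let p := caVisit grid threshold xRange yRange x y cr d rest v
      runB grid threshold xRange yRange p.1 p.2 sv
  | CAItem.sparse x y cr d :: rest, v, sv =>
      let p := caVisit grid threshold xRange yRange x y cr d rest v
      runB grid threshold xRange yRange p.1 p.2 (sv ++ [x + y * xRange])
termination_by stack v sv => ((((caCodes grid xRange).filter fun c => decide (c ∉ v)).length, stack.length) : Nat × Nat)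
decreasing_by
  · exact caLex_helper (caFilter_le _ _ _) (Nat.lt_succ_self _)
  · exact caLex_helper (Nat.le_refl _) (Nat.lt_succ_self _)
  · rcases caVisit_spec grid threshold xRange yRange x y cr d rest v with ⟨h1, h2⟩ | h
    · rw [h1, h2]; exact caLex_helper (Nat.le_refl _) (Nat.lt_succ_self _)
    · exact Prod.Lex.left _ _ h
  · rcases caVisit_spec grid threshold xRange yRange x y cr d rest v with ⟨h1, h2⟩ | h
    · rw [h1, h2]; exact caLex_helper (Nat.le_refl _) (Nat.lt_succ_self _)
    · exact Prod.Lex.left _ _ h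

def checkAround_alt (grid : List (Int × List (Int × List Int))) (x : Int) (y : Int) (checkRadius : Int) (threshold : Int) (xRange : Int) (yRange : Int) (depth : Int) (sparseVisited : List Int) (visited : List Int) : List Int × List Int :=
  let sv0 := if depth = 0 then [x + y * xRange] else sparseVisited
  let v0 := if depth = 0 then ([] : List Int) else visited
  runB grid threshold xRange yRange [CAItem.visit x y checkRadius depth] v0 sv0

-- ===== PRECONDITION & SPEC =====
-- When the top-level guard fails A returns at once; otherwise Pre_ excludes (a) negative depth,
-- where A's depth==0 branch re-fires inside the recursion and its result is an accident of
-- Python's list aliasing, and (b) grids missing a cell of (0,xRange)x(0,yRange), since a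
-- reachable missing cell makes A raise KeyError (this cardinality form conservatively also
-- excludes a few incomplete grids whose missing cells A never reaches; see the cites).
def Pre_checkAround (grid : List (Int × List (Int × List Int))) (x : Int) (y : Int) (checkRadius : Int) (threshold : Int) (xRange : Int) (yRange : Int) (depth : Int) (sparseVisited : List Int) (visited : List Int) : Prop :=
  ¬ ((x + y * xRange) ∉ (if depth = 0 then ([] : List Int) else visited) ∧ 0 < checkRadius ∧ caInGrid grid x y = true) ∨
  (0 ≤ depth ∧
   ((((grid.map Prod.fst).filter fun k => decide (0 < k ∧ k < xRange)).dedup.length : Int) = max (xRange - 1) 0 ∧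
    ∀ p ∈ grid, (((p.2.map Prod.fst).filter fun k => decide (0 < k ∧ k < yRange)).dedup.length : Int) = max (yRange - 1) 0))
instance (grid : List (Int × List (Int × List Int))) (x : Int) (y : Int) (checkRadius : Int) (threshold : Int) (xRange : Int) (yRange : Int) (depth : Int) (sparseVisited : List Int) (visited : List Int) : Decidable (Pre_checkAround grid x y checkRadius threshold xRange yRange depth sparseVisited visited) := by unfold Pre_checkAround; infer_instance

def pvWitness_checkAround : (List (Int × List (Int × List Int))) × Int × Int × Int × Int × Int × Int × Int × List Int × List Int :=
  ([(1, [(1, []), (2, [7])]), (2, [(1, [3, 4]), (2, [])])], 1, 1, 1, 1, 3, 3, 0, [], [])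

def Spec_checkAround (grid : List (Int × List (Int × List Int))) (x : Int) (y : Int) (checkRadius : Int) (threshold : Int) (xRange : Int) (yRange : Int) (depth : Int) (sparseVisited : List Int) (visited : List Int) (out : List Int × List Int) : Prop := out = checkAround_alt grid x y checkRadius threshold xRange yRange depth sparseVisited visited
instance (grid : List (Int × List (Int × List Int))) (x : Int) (y : Int) (checkRadius : Int) (threshold : Int) (xRange : Int) (yRange : Int) (depth : Int) (sparseVisited : List Int) (visited : List Int) (out : List Int × List Int) : Decidable (Spec_checkAround grid x y checkRadius threshold xRange yRange depth sparseVisited visited out) := by unfold Spec_checkAround; infer_instance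

-- ===== CLAIM (what is proved, stated in full; the proofs are below) =====
def Claim_equal_checkAround : Prop := ∀ (grid : List (Int × List (Int × List Int))) (x : Int) (y : Int) (checkRadius : Int) (threshold : Int) (xRange : Int) (yRange : Int) (depth : Int) (sparseVisited : List Int) (visited : List Int), Dom_checkAround grid x y checkRadius threshold xRange yRange depth sparseVisited visited → Pre_checkAround grid x y checkRadius threshold xRange yRange depth sparseVisited visited → Spec_checkAround grid x y checkRadius threshold xRange yRange depth sparseVisited visited (checkAround grid x y checkRadius threshold xRange yRange depth sparseVisited visited)

-- ===== LEMMAS AND PROOFS =====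

lemma caMerge_no_new (l acc : List Int) (h : ∀ e ∈ l, e ∈ acc) : l.foldl caMergeStep acc = acc := by
  induction l generalizing acc with
  | nil => rfl
  | cons b t ih =>
    have hb : caMergeStep acc b = acc := if_pos (h b (List.mem_cons_self))
    simp only [List.foldl_cons, hb]
    exact ih acc (fun e he => h e (List.mem_cons_of_mem _ he))

lemma caMerge_self (l : List Int) : l.foldl caMergeStep l = l :=
  caMerge_no_new l l (fun _ h => h)

-- A's sequential neighbour scan as a fold of per-item steps over the classified items
def stepA (grid : List (Int × List (Int × List Int))) (threshold xRange yRange : Int) (fuel : Nat) (st : List Int × List Int) : CAItem → List Int × List Int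
  | CAItem.dense code => if code ∉ st.1 then (st.1 ++ [code], st.2) else st
  | CAItem.sparse nx ny delta d' =>
      let p := checkAroundFuel grid nx ny delta threshold xRange yRange d' (st.2 ++ [nx + ny * xRange]) st.1 fuel
      (p.1.foldl caMergeStep p.1, p.2.foldl caMergeStep p.2)
  | CAItem.visit _ _ _ _ => st

def caOK (fuel : Nat) : CAItem → Prop
  | CAItem.dense _ => True
  | CAItem.sparse _ _ cr d => 6 * cr.toNat + (5 - d).toNat < fuel ∧ 1 ≤ d
  | CAItem.visit _ _ _ _ => False

lemma mem_caChildren (grid : List (Int × List (Int × List Int))) (threshold xRange yRange cx cy delta d : Int) (it : CAItem)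
    (h : it ∈ caChildren grid threshold xRange yRange cx cy delta d) :
    (∃ c, it = CAItem.dense c) ∨ ∃ nx ny, it = CAItem.sparse nx ny delta (d + 1) := by
  simp only [caChildren, List.mem_flatMap, List.mem_filterMap] at h
  rcases h with ⟨dx, _, dy, _, hcl⟩
  simp only [caClassify] at hcl
  split at hcl
  · simp at hcl
  · split at hcl
    · split at hcl
      · right; exact ⟨_, _, (Option.some_inj.mp hcl).symm⟩
      · left; exact ⟨_, (Option.some_inj.mp hcl).symm⟩
    · simp at hcl

lemma caMu_child_lt (cr d : Int) (hcr : 0 < cr) (hd : 0 ≤ d) :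
    6 * (cr - (if 25 < d then 1 else 0) - (if 10 < d then 1 else 0) - (if 4 < d then 1 else 0)).toNat
      + (5 - (d + 1)).toNat
    < 6 * cr.toNat + (5 - d).toNat := by
  split_ifs <;> omega

lemma caDelta_eq (cr d : Int) :
    (if 4 < d then (if 10 < d then (if 25 < d then cr - 1 else cr) - 1 else (if 25 < d then cr - 1 else cr)) - 1
     else (if 10 < d then (if 25 < d then cr - 1 else cr) - 1 else (if 25 < d then cr - 1 else cr)))
    = cr - (if 25 < d then 1 else 0) - (if 10 < d then 1 else 0) - (if 4 < d then 1 else 0) := by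
  split_ifs <;> ring

-- fuse A's nested dx/dy loop into a fold over the classified item list
lemma caFoldl_filterMap {σ : Type} (g : Int → Option CAItem) (f : σ → CAItem → σ) (F : σ → Int → σ)
    (h : ∀ st dy, F st dy = match g dy with | some it => f st it | none => st) :
    ∀ (ys : List Int) (st : σ), ys.foldl F st = (ys.filterMap g).foldl f st := by
  intro ys
  induction ys with
  | nil => intro _; rfl
  | cons a t ih =>
    intro st
    rw [List.foldl_cons, List.filterMap_cons, h st a]
    cases hga : g a with
    | none => exact ih st
    | some it => rw [List.foldl_cons]; exact ih _

lemma caFoldl_nested_classify {σ : Type} (xs ys : List Int) (g : Int → Int → Option CAItem)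
    (f : σ → CAItem → σ) (F : Int → σ → Int → σ) (st0 : σ)
    (h : ∀ dx st dy, F dx st dy = match g dx dy with | some it => f st it | none => st) :
    xs.foldl (fun st dx => ys.foldl (F dx) st) st0
      = (xs.flatMap fun dx => ys.filterMap (g dx)).foldl f st0 := by
  have hF : (fun st dx => ys.foldl (F dx) st) = fun st dx => (ys.filterMap (g dx)).foldl f st := by
    funext st dx
    exact caFoldl_filterMap (g dx) f (F dx) (h dx) ys st
  rw [hF, List.foldl_flatMap]

lemma runB_sparse_eq_visit (grid : List (Int × List (Int × List Int))) (threshold xRange yRange x y cr d : Int) (rest : List CAItem) (v sv : List Int) :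
    runB grid threshold xRange yRange (CAItem.sparse x y cr d :: rest) v sv
      = runB grid threshold xRange yRange (CAItem.visit x y cr d :: rest) v (sv ++ [x + y * xRange]) := by
  rw [runB, runB]

lemma runB_items (grid : List (Int × List (Int × List Int))) (threshold xRange yRange : Int) (fuel : Nat)
    (IH : ∀ x y cr d rest v sv, 6 * cr.toNat + (5 - d).toNat < fuel → 1 ≤ d →
      runB grid threshold xRange yRange (CAItem.visit x y cr d :: rest) v sv
        = runB grid threshold xRange yRange rest
            (checkAroundFuel grid x y cr threshold xRange yRange d sv v fuel).1
            (checkAroundFuel grid x y cr threshold xRange yRange d sv v fuel).2) :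
    ∀ items, (∀ it ∈ items, caOK fuel it) → ∀ rest v sv,
      runB grid threshold xRange yRange (items ++ rest) v sv
        = runB grid threshold xRange yRange rest
            (items.foldl (stepA grid threshold xRange yRange fuel) (v, sv)).1
            (items.foldl (stepA grid threshold xRange yRange fuel) (v, sv)).2 := by
  intro items
  induction items with
  | nil => intro _ rest v sv; simp [List.foldl_nil]
  | cons it t ih =>
    intro hok rest v sv
    have hokt : ∀ x ∈ t, caOK fuel x := fun x hx => hok x (List.mem_cons_of_mem _ hx)
    match it with
    | CAItem.visit _ _ _ _ => exact absurd (hok _ List.mem_cons_self) (by simp [caOK])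
    | CAItem.dense code =>
      simp only [List.cons_append]
      rw [runB]
      by_cases hc : code ∉ v
      · rw [if_pos hc, ih hokt]
        simp only [List.foldl_cons, stepA, if_pos hc]
      · rw [if_neg hc, ih hokt]
        simp only [List.foldl_cons, stepA, if_neg hc]
    | CAItem.sparse nx ny cr' d' =>
      have hmu := hok _ List.mem_cons_self
      simp only [caOK] at hmu
      simp only [List.cons_append]
      rw [runB_sparse_eq_visit, IH nx ny cr' d' (t ++ rest) v (sv ++ [nx + ny * xRange]) hmu.1 hmu.2,
        ih hokt]
      simp only [List.foldl_cons, stepA]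
      rw [caMerge_self, caMerge_self]

lemma runB_nil (grid : List (Int × List (Int × List Int))) (threshold xRange yRange : Int) (v sv : List Int) :
    runB grid threshold xRange yRange [] v sv = (v, sv) := by
  rw [runB]

-- one unfolding of A's recursion, with the neighbour scan fused into a fold over caChildren
lemma checkAroundFuel_succ (grid : List (Int × List (Int × List Int))) (threshold xRange yRange x y cr d : Int) (sv v : List Int) (n : Nat) :
    checkAroundFuel grid x y cr threshold xRange yRange d sv v (n + 1)
      = (if (x + y * xRange) ∉ (if d = 0 then ([] : List Int) else v) ∧ 0 < cr ∧ caInGrid grid x y = true then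
           (caChildren grid threshold xRange yRange x y
               (cr - (if 25 < d then 1 else 0) - (if 10 < d then 1 else 0) - (if 4 < d then 1 else 0)) d).foldl
             (stepA grid threshold xRange yRange n)
             ((if d = 0 then ([] : List Int) else v) ++ [x + y * xRange],
              (if d = 0 then [x + y * xRange] else sv))
         else ((if d = 0 then ([] : List Int) else v), (if d = 0 then [x + y * xRange] else sv))) := by
  simp only [checkAroundFuel]
  by_cases hg : (x + y * xRange) ∉ (if d = 0 then ([] : List Int) else v) ∧ 0 < cr ∧ caInGrid grid x y = true
  · rw [if_pos hg, if_pos hg, caDelta_eq cr d]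
    rw [caFoldl_nested_classify _ _
          (caClassify grid threshold xRange yRange x y
            (cr - (if 25 < d then 1 else 0) - (if 10 < d then 1 else 0) - (if 4 < d then 1 else 0)) d)
          (stepA grid threshold xRange yRange n) _ _ ?_]
    · rfl
    · intro dx st dy
      simp only [caClassify]
      by_cases h0 : dx = 0 ∧ dy = 0
      · rw [if_neg (by simpa using h0), if_pos h0]
      · rw [if_pos (by simpa using h0), if_neg h0]
        by_cases hrange : 0 < x + dx ∧ x + dx < xRange ∧ 0 < y + dy ∧ y + dy < yRange
        · rw [if_pos hrange, if_pos hrange]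
          by_cases hth : ((caCell grid (x + dx) (y + dy)).length : Int) < threshold
          · rw [if_pos hth, if_pos hth]
            simp only [stepA]
          · rw [if_neg hth, if_neg hth]
            simp only [stepA]
        · rw [if_neg hrange, if_neg hrange]
  · rw [if_neg hg, if_neg hg]

lemma caBridge : ∀ (fuel : Nat) (grid : List (Int × List (Int × List Int))) (threshold xRange yRange x y cr d : Int) (rest : List CAItem) (v sv : List Int),
    6 * cr.toNat + (5 - d).toNat < fuel → 0 ≤ d →
    runB grid threshold xRange yRange (CAItem.visit x y cr d :: rest)
        (if d = 0 then ([] : List Int) else v) (if d = 0 then [x + y * xRange] else sv)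
      = runB grid threshold xRange yRange rest
          (checkAroundFuel grid x y cr threshold xRange yRange d sv v fuel).1
          (checkAroundFuel grid x y cr threshold xRange yRange d sv v fuel).2 := by
  intro fuel
  induction fuel with
  | zero => intro _ _ _ _ _ _ _ _ _ _ _ h _; omega
  | succ n ihn =>
    intro grid threshold xRange yRange x y cr d rest v sv hmu hd
    have IH : ∀ x y cr d rest v sv, 6 * cr.toNat + (5 - d).toNat < n → 1 ≤ d →
        runB grid threshold xRange yRange (CAItem.visit x y cr d :: rest) v sv
          = runB grid threshold xRange yRange rest
              (checkAroundFuel grid x y cr threshold xRange yRange d sv v n).1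
              (checkAroundFuel grid x y cr threshold xRange yRange d sv v n).2 := by
      intro x' y' cr' d' rest' v' sv' h1 h2
      have := ihn grid threshold xRange yRange x' y' cr' d' rest' v' sv' h1 (by omega)
      rw [if_neg (by omega), if_neg (by omega)] at this
      exact this
    rw [checkAroundFuel_succ, runB]
    show runB grid threshold xRange yRange
        (caVisit grid threshold xRange yRange x y cr d rest (if d = 0 then ([] : List Int) else v)).1
        (caVisit grid threshold xRange yRange x y cr d rest (if d = 0 then ([] : List Int) else v)).2
        (if d = 0 then [x + y * xRange] else sv) = _
    simp only [caVisit]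
    by_cases hg : (x + y * xRange) ∉ (if d = 0 then ([] : List Int) else v) ∧ 0 < cr ∧ caInGrid grid x y = true
    · rw [if_pos hg]
      try rw [if_pos hg]
      exact runB_items grid threshold xRange yRange n IH
        (caChildren grid threshold xRange yRange x y
          (cr - (if 25 < d then 1 else 0) - (if 10 < d then 1 else 0) - (if 4 < d then 1 else 0)) d)
        (by
          intro it hit
          rcases mem_caChildren grid threshold xRange yRange x y _ d it hit with ⟨c, rfl⟩ | ⟨nx, ny, rfl⟩
          · trivial
          · exact ⟨by have := caMu_child_lt cr d hg.2.1 hd; omega, by omega⟩)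
        rest _ _
    · rw [if_neg hg]
      try rw [if_neg hg]

-- ===== VERDICT (by name: the statement is the Claim_ definition above) =====
theorem checkAround_spec : Claim_equal_checkAround := by
  intro grid x y checkRadius threshold xRange yRange depth sparseVisited visited _ hpre
  unfold Spec_checkAround checkAround checkAround_alt
  rcases hpre with hng | ⟨hd, _⟩
  · rw [checkAroundFuel_succ, if_neg hng]
    have halt : runB grid threshold xRange yRange [CAItem.visit x y checkRadius depth]
        (if depth = 0 then ([] : List Int) else visited)
        (if depth = 0 then [x + y * xRange] else sparseVisited)
        = ((if depth = 0 then ([] : List Int) else visited),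
           (if depth = 0 then [x + y * xRange] else sparseVisited)) := by
      rw [runB]
      simp only [caVisit]
      rw [if_neg hng]
      exact runB_nil grid threshold xRange yRange _ _
    exact halt.symm
  · have h := caBridge (6 * checkRadius.toNat + (5 - depth).toNat + 1) grid threshold xRange yRange
      x y checkRadius depth [] visited sparseVisited (by omega) hd
    rw [runB_nil] at h
    exact (h.trans Prod.mk.eta).symm
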